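-- pv_equiv track=rewrite | github.com/miquelpuigmena/NaturalLanguageProcessing | 3_Extracting_noun_groups_using_ML/ml_chunker.py | extract_features_sent
-- ===== SOURCE A (Python) =====
-- def extract_features_sent(sentence, w_size, feature_names):
--     """
--     Extract the features from one sentence
--     returns X and y, where X is a list of dictionaries and
--     y is a list of symbols
--     :param sentence: string containing the CoNLL structure of a sentence
--     :param w_size:
--     :return:
--     """
--
--     # We pad the sentence to extract the context window more easily
--     start = "BOS BOS BOS\n"
--     end = "\nEOS EOS EOS"
--     start *= w_size
--     end *= w_size
--     sentence = start + sentence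
--     sentence += end
--
--     # Each sentence is a list of rows
--     sentence = sentence.splitlines()
--     padded_sentence = list()
--     for line in sentence:
--         line = line.split()
--         padded_sentence.append(line)
--
--     # We extract the features and the classes
--     # X contains is a list of features, where each feature vector is a dictionary
--     # y is the list of classes
--     X = list()
--     y = list()
--     for i in range(len(padded_sentence) - 2 * w_size):
--         # x is a row of X
--         x = list()
--         # The words in lower case
--         for j in range(2 * w_size + 1):
--             x.append(padded_sentence[i + j][0].lower())
--         # The POS
--         for j in range(2 * w_size + 1):
--             x.append(padded_sentence[i + j][1])
--         # The chunks (Up to the word)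
--         for j in range(w_size):
--             x.append(padded_sentence[i + j][2])
--
--         # We represent the feature vector as a dictionary
--         X.append(dict(zip(feature_names, x)))
--         # The classes are stored in a list
--         y.append(padded_sentence[i + w_size][2])
--     return X, y
-- ===== SOURCE B (Python) =====
-- def extract_features_sent(sentence, w_size, feature_names):
--     """Streaming re-implementation: a single pass over the padded lines with a
--     sliding-window buffer of parsed rows; no random access into a row list."""
--     padded = "BOS BOS BOS\n" * w_size + sentence + "\nEOS EOS EOS" * w_size
--     span = 2 * w_size + 1
--     X, y, window = [], [], []
--     for line in padded.splitlines():
--         f = line.split()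
--         window.append((f[0].lower(), f[1], f[2]))
--         if len(window) == span:
--             feats = [t[0] for t in window] + [t[1] for t in window] \
--                     + [t[2] for t in window[:w_size]]
--             X.append(dict(zip(feature_names, feats)))
--             y.append(window[w_size][2])
--             window.pop(0)
--     return X, y
-- ===== Notes on version B (the rewrite author's own statement) =====
-- stated objective: alternative
-- what changed: A's random-access index loops over the full padded row list are replaced by a single streaming pass that parses each line once into a tuple and maintains a sliding-window buffer (append / emit-when-full / pop-front), never indexing the row list.
import Mathlib
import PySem

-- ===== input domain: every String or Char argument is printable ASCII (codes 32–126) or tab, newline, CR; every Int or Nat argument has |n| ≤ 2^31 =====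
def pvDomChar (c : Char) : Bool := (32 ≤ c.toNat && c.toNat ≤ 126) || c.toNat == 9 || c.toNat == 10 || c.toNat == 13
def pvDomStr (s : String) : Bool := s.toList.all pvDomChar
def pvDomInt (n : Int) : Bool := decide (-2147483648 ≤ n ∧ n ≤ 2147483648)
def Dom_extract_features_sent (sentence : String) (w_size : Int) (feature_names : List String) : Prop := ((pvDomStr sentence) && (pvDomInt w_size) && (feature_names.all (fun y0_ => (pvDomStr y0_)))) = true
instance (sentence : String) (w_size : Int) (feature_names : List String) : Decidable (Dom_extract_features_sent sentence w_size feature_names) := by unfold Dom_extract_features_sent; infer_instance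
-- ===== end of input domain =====

-- B replaces A's random-access index loops over the padded row list by a single streaming
-- pass with a sliding-window buffer of parsed rows (objective: alternative, same cost).
-- Equivalence of the RETURN values is proved on Pre_ (exactly the inputs where the Python A returns).

-- ===== PORT A =====
-- dict(zip(names, vals)) as an insertion-ordered association list (identical in both Pythons)
def pvDictZip (names : List String) (vals : List String) : List (String × String) :=
  ((names.zip vals).foldl (fun d p => PySem.Dict.insert d p.1 p.2) PySem.Dict.empty).items

def extract_features_sent (sentence : String) (w_size : Int) (feature_names : List String) : (List (List (String × String))) × List String :=
  -- start = "BOS BOS BOS\n" * w_size; end = "\nEOS EOS EOS" * w_size; sentence = start + sentence + end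
  let padded : List Char :=
    PySem.List.pyRepeat "BOS BOS BOS\n".toList w_size ++ sentence.toList ++
      PySem.List.pyRepeat "\nEOS EOS EOS".toList w_size
  -- sentence = sentence.splitlines(); padded_sentence built by the append loop
  let lines := PySem.Chars.splitlines padded
  let padded_sentence : List (List (List Char)) :=
    lines.foldl (fun acc line => acc ++ [PySem.Chars.split₀ line]) []
  -- for i in range(len(padded_sentence) - 2*w_size): three inner index loops
  (PySem.List.pyRange 0 ((padded_sentence.length : Int) - 2 * w_size) 1).foldl
    (fun (acc : (List (List (String × String))) × List String) i =>
      let x := (PySem.List.pyRange 0 (2 * w_size + 1) 1).foldl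
        (fun x j => x ++ [String.ofList (PySem.Chars.lower ((PySem.List.pyGet? ((PySem.List.pyGet? padded_sentence (i + j)).getD []) 0).getD []))]) []
      let x := (PySem.List.pyRange 0 (2 * w_size + 1) 1).foldl
        (fun x j => x ++ [String.ofList ((PySem.List.pyGet? ((PySem.List.pyGet? padded_sentence (i + j)).getD []) 1).getD [])]) x
      let x := (PySem.List.pyRange 0 w_size 1).foldl
        (fun x j => x ++ [String.ofList ((PySem.List.pyGet? ((PySem.List.pyGet? padded_sentence (i + j)).getD []) 2).getD [])]) x
      (acc.1 ++ [pvDictZip feature_names x],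
       acc.2 ++ [String.ofList ((PySem.List.pyGet? ((PySem.List.pyGet? padded_sentence (i + w_size)).getD []) 2).getD [])]))
    ([], [])

-- ===== PORT B =====
-- window.append((f[0].lower(), f[1], f[2])) — one line parsed into a row tuple
def pvRowTup (l : List Char) : String × String × String :=
  let f := PySem.Chars.split₀ l
  (String.ofList (PySem.Chars.lower ((PySem.List.pyGet? f 0).getD [])),
   String.ofList ((PySem.List.pyGet? f 1).getD []),
   String.ofList ((PySem.List.pyGet? f 2).getD []))

def extract_features_sent_alt (sentence : String) (w_size : Int) (feature_names : List String) : (List (List (String × String))) × List String :=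
  let padded : List Char :=
    PySem.List.pyRepeat "BOS BOS BOS\n".toList w_size ++ sentence.toList ++
      PySem.List.pyRepeat "\nEOS EOS EOS".toList w_size
  -- one pass over the padded lines with a sliding-window buffer
  let st := (PySem.Chars.splitlines padded).foldl
    (fun (st : (List (List (String × String))) × List String × List (String × String × String)) line =>
      let window := st.2.2 ++ [pvRowTup line]
      if (window.length : Int) = 2 * w_size + 1 then
        let feats := window.map (fun t => t.1) ++ window.map (fun t => t.2.1) ++
          (PySem.List.slice window none (some w_size)).map (fun t => t.2.2)
        (st.1 ++ [pvDictZip feature_names feats],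
         st.2.1 ++ [((PySem.List.pyGet? window w_size).getD ("", "", "")).2.2],
         window.drop 1)
      else (st.1, st.2.1, window))
    ([], [], [])
  (st.1, st.2.1)

-- ===== PRECONDITION & SPEC =====
-- Pre_ = exactly the inputs on which the Python A returns (no IndexError): a non-negative
-- window, every line of the sentence splitting into at least 3 fields, and (when padding is
-- added, w_size > 0) a nonempty sentence with no trailing '\n' (those would create an empty
-- padded line whose missing fields A indexes).
def Pre_extract_features_sent (sentence : String) (w_size : Int) (feature_names : List String) : Prop :=
  0 ≤ w_size ∧
  (PySem.Chars.splitlines sentence.toList).all (fun l => 3 ≤ (PySem.Chars.split₀ l).length) = true ∧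
  (w_size = 0 ∨ (sentence.toList ≠ [] ∧ sentence.toList.getLast? ≠ some '\n'))
instance (sentence : String) (w_size : Int) (feature_names : List String) : Decidable (Pre_extract_features_sent sentence w_size feature_names) := by unfold Pre_extract_features_sent; infer_instance

def pvWitness_extract_features_sent : String × Int × List String :=
  ("The DT B-NP\ncat NN I-NP", 1, ["w0", "w1", "w2", "p0", "p1", "p2", "c0"])

def Spec_extract_features_sent (sentence : String) (w_size : Int) (feature_names : List String) (out : (List (List (String × String))) × List String) : Prop := out = extract_features_sent_alt sentence w_size feature_names
instance (sentence : String) (w_size : Int) (feature_names : List String) (out : (List (List (String × String))) × List String) : Decidable (Spec_extract_features_sent sentence w_size feature_names out) := by unfold Spec_extract_features_sent; infer_instance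

-- ===== CLAIM (what is proved, stated in full; the proofs are below) =====
def Claim_equal_extract_features_sent : Prop := ∀ (sentence : String) (w_size : Int) (feature_names : List String), Dom_extract_features_sent sentence w_size feature_names → Pre_extract_features_sent sentence w_size feature_names → Spec_extract_features_sent sentence w_size feature_names (extract_features_sent sentence w_size feature_names)

-- ===== LEMMAS AND PROOFS =====

-- A window read by a per-index loop equals mapping over the drop/take window of the row list.
theorem pv_window_map {X Y : Type} (rows : List X) (g : X → Y) (d : X) (i m : Int)
    (hi : 0 ≤ i) (hin : i + m ≤ (rows.length : Int)) :
    (PySem.List.pyRange 0 m 1).map (fun j => g ((PySem.List.pyGet? rows (i + j)).getD d)) =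
      ((rows.drop i.toNat).take m.toNat).map g := by
  rw [PySem.List.pyRange_one, List.map_map]
  apply List.ext_getElem
  · simp; omega
  · intro k h1 h2
    simp only [List.getElem_map, List.getElem_range, Function.comp]
    have hk : k < m.toNat := by simpa using h1
    have hidx : i + (0 + (k : Int)) = ((i.toNat + k : Nat) : Int) := by omega
    rw [hidx, PySem.List.pyGet?_natCast]
    have hklt : i.toNat + k < rows.length := by omega
    rw [List.getElem?_eq_getElem hklt]
    simp [List.getElem_drop, List.getElem_take]

-- Shifting the emitted window past the head row (one step of the stream, closed form).
theorem pv_emit_shift {T C : Type} (s : Nat) (hw : T) (tw rest : List T) (f : List T → C)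
    (hlen : (hw :: tw).length = s) (Z0 : List C) :
    (Z0 ++ [f (hw :: tw)]) ++ (List.range rest.length).map (fun k => f (((tw ++ rest).drop k).take s)) =
    Z0 ++ (List.range (rest.length + 1)).map (fun k => f ((((hw :: tw) ++ rest).drop k).take s)) := by
  have h1 : (hw :: (tw ++ rest)).take s = hw :: tw := by
    rw [← hlen, ← List.cons_append]; exact List.take_left ..
  rw [List.range_succ_eq_map, List.map_cons, List.map_map]
  simp only [List.drop_zero, List.cons_append, List.append_assoc, h1]
  congr 1

-- The streaming fold with a sliding-window buffer, characterised in closed form.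
theorem pv_stream {T A B : Type} (s : Nat)
    (emitX : List T → A) (emitY : List T → B) :
    ∀ (rows : List T) (X0 : List A) (Y0 : List B) (win0 : List T), win0.length < s →
    rows.foldl (fun (st : List A × List B × List T) t =>
        if (st.2.2 ++ [t]).length = s then
          (st.1 ++ [emitX (st.2.2 ++ [t])], st.2.1 ++ [emitY (st.2.2 ++ [t])], (st.2.2 ++ [t]).drop 1)
        else (st.1, st.2.1, st.2.2 ++ [t])) (X0, Y0, win0) =
      (X0 ++ (List.range (win0.length + rows.length + 1 - s)).map
          (fun k => emitX (((win0 ++ rows).drop k).take s)),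
       Y0 ++ (List.range (win0.length + rows.length + 1 - s)).map
          (fun k => emitY (((win0 ++ rows).drop k).take s)),
       (win0 ++ rows).drop (win0.length + rows.length + 1 - s)) := by
  intro rows
  induction rows with
  | nil =>
    intro X0 Y0 win0 h
    have h0 : win0.length + 0 + 1 - s = 0 := by omega
    simp [h0]
  | cons t rest ih =>
    intro X0 Y0 win0 h
    rw [List.foldl_cons]
    by_cases hlen : (win0 ++ [t]).length = s
    · simp only [hlen, if_true]
      rw [ih _ _ _ (by simp at hlen ⊢; omega)]
      obtain ⟨hw, tw, e⟩ := List.exists_cons_of_ne_nil (List.append_ne_nil_of_right_ne_nil win0 (by simp) : win0 ++ [t] ≠ [])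
      have hlen' : (hw :: tw).length = s := by rw [← e]; exact hlen
      have hall : win0 ++ t :: rest = (hw :: tw) ++ rest := by rw [← e]; simp
      have hc1 : ((win0 ++ [t]).drop 1).length + rest.length + 1 - s = rest.length := by
        rw [e]; simp at hlen' ⊢; omega
      have hc2 : win0.length + (t :: rest).length + 1 - s = rest.length + 1 := by
        simp at hlen ⊢; omega
      have hd : (win0 ++ [t]).drop 1 = tw := by rw [e]; rfl
      rw [hc1, hc2, hd, hall, e]
      refine Prod.ext ?_ (Prod.ext ?_ ?_)
      · simpa using pv_emit_shift s hw tw rest emitX hlen' X0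
      · simpa using pv_emit_shift s hw tw rest emitY hlen' Y0
      · simp only [List.cons_append, List.drop_succ_cons]
    · simp only [hlen, if_false]
      rw [ih _ _ _ (by simp at hlen h ⊢; omega)]
      have hall : (win0 ++ [t]) ++ rest = win0 ++ t :: rest := by simp
      have hc : (win0 ++ [t]).length + rest.length + 1 - s = win0.length + (t :: rest).length + 1 - s := by
        simp; omega
      rw [hall, hc]

-- ===== VERDICT (by name: the statement is the Claim_ definition above) =====
theorem extract_features_sent_spec : Claim_equal_extract_features_sent := by
  intro sentence w_size feature_names _hDom hPre
  obtain ⟨hw, -, -⟩ := hPre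
  unfold Spec_extract_features_sent extract_features_sent extract_features_sent_alt
  dsimp only []
  set lines := PySem.Chars.splitlines
    (PySem.List.pyRepeat "BOS BOS BOS\n".toList w_size ++ sentence.toList ++
      PySem.List.pyRepeat "\nEOS EOS EOS".toList w_size) with hlines
  set s : Nat := (2 * w_size + 1).toNat with hs
  have hs0 : 0 < s := by omega
  -- B side: the pass over the lines is the generic sliding-window fold over the parsed rows
  have hfold : (lines.foldl
      (fun (st : (List (List (String × String))) × List String × List (String × String × String)) line =>
        let window := st.2.2 ++ [pvRowTup line]
        if (window.length : Int) = 2 * w_size + 1 then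
          let feats := window.map (fun t => t.1) ++ window.map (fun t => t.2.1) ++
            (PySem.List.slice window none (some w_size)).map (fun t => t.2.2)
          (st.1 ++ [pvDictZip feature_names feats],
           st.2.1 ++ [((PySem.List.pyGet? window w_size).getD ("", "", "")).2.2],
           window.drop 1)
        else (st.1, st.2.1, window)) ([], [], [])) =
      (lines.map pvRowTup).foldl
      (fun (st : (List (List (String × String))) × List String × List (String × String × String)) t =>
        if (st.2.2 ++ [t]).length = s then
          (st.1 ++ [pvDictZip feature_names ((st.2.2 ++ [t]).map (fun t => t.1) ++ (st.2.2 ++ [t]).map (fun t => t.2.1) ++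
            (PySem.List.slice (st.2.2 ++ [t]) none (some w_size)).map (fun t => t.2.2))],
           st.2.1 ++ [((PySem.List.pyGet? (st.2.2 ++ [t]) w_size).getD ("", "", "")).2.2],
           (st.2.2 ++ [t]).drop 1)
        else (st.1, st.2.1, st.2.2 ++ [t])) ([], [], []) := by
    rw [List.foldl_map]
    apply PySem.List.foldl_congr_mem
    intro acc line _
    by_cases hb : ((acc.2.2 ++ [pvRowTup line]).length : Int) = 2 * w_size + 1
    · simp only [if_pos hb, if_pos (show (acc.2.2 ++ [pvRowTup line]).length = s by omega)]
    · simp only [if_neg hb, if_neg (show ¬ (acc.2.2 ++ [pvRowTup line]).length = s by omega)]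
  rw [hfold, pv_stream s
      (fun win => pvDictZip feature_names (win.map (fun t => t.1) ++ win.map (fun t => t.2.1) ++
        (PySem.List.slice win none (some w_size)).map (fun t => t.2.2)))
      (fun win => ((PySem.List.pyGet? win w_size).getD ("", "", "")).2.2)
      (lines.map pvRowTup) [] [] [] (by simpa using hs0)]
  simp only [PySem.List.foldl_append_singleton_eq_map, List.nil_append, List.length_nil, List.length_map,
    Nat.zero_add]
  rw [PySem.List.foldl_prod_mk
      (f := fun (acc : List (List (String × String))) (i : Int) =>
        acc ++ [pvDictZip feature_names
          (((PySem.List.pyRange 0 (2 * w_size + 1) 1).map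
              (fun j => String.ofList (PySem.Chars.lower ((PySem.List.pyGet? ((PySem.List.pyGet? (lines.map PySem.Chars.split₀) (i + j)).getD []) 0).getD []))) ++
            (PySem.List.pyRange 0 (2 * w_size + 1) 1).map
              (fun j => String.ofList ((PySem.List.pyGet? ((PySem.List.pyGet? (lines.map PySem.Chars.split₀) (i + j)).getD []) 1).getD []))) ++
            (PySem.List.pyRange 0 w_size 1).map
              (fun j => String.ofList ((PySem.List.pyGet? ((PySem.List.pyGet? (lines.map PySem.Chars.split₀) (i + j)).getD []) 2).getD [])))])
      (g := fun (acc : List String) (i : Int) =>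
        acc ++ [String.ofList ((PySem.List.pyGet? ((PySem.List.pyGet? (lines.map PySem.Chars.split₀) (i + w_size)).getD []) 2).getD [])])]
  refine Prod.ext ?_ ?_
  · simp only [PySem.List.foldl_append_singleton_eq_map, List.nil_append]
    rw [PySem.List.pyRange_one 0 ((lines.length : Int) - 2 * w_size), List.map_map]
    rw [show ((lines.length : Int) - 2 * w_size - 0).toNat = lines.length + 1 - s from by omega]
    apply List.map_congr_left
    intro k hk
    simp only [List.mem_range] at hk
    simp only [Function.comp, zero_add]
    congr 1
    have hA1 : (PySem.List.pyRange 0 (2 * w_size + 1) 1).map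
        (fun j => String.ofList (PySem.Chars.lower ((PySem.List.pyGet? ((PySem.List.pyGet? (lines.map PySem.Chars.split₀) ((k : Int) + j)).getD []) 0).getD []))) =
        (((lines.map PySem.Chars.split₀).drop ((k : Int)).toNat).take ((2 * w_size + 1).toNat)).map
          (fun r => String.ofList (PySem.Chars.lower ((PySem.List.pyGet? r 0).getD []))) :=
      pv_window_map (lines.map PySem.Chars.split₀) (fun r => String.ofList (PySem.Chars.lower ((PySem.List.pyGet? r 0).getD []))) [] (k : Int) (2 * w_size + 1) (by omega) (by simp only [List.length_map]; omega)
    have hA2 : (PySem.List.pyRange 0 (2 * w_size + 1) 1).map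
        (fun j => String.ofList ((PySem.List.pyGet? ((PySem.List.pyGet? (lines.map PySem.Chars.split₀) ((k : Int) + j)).getD []) 1).getD [])) =
        (((lines.map PySem.Chars.split₀).drop ((k : Int)).toNat).take ((2 * w_size + 1).toNat)).map
          (fun r => String.ofList ((PySem.List.pyGet? r 1).getD [])) :=
      pv_window_map (lines.map PySem.Chars.split₀) (fun r => String.ofList ((PySem.List.pyGet? r 1).getD [])) [] (k : Int) (2 * w_size + 1) (by omega) (by simp only [List.length_map]; omega)
    have hA3 : (PySem.List.pyRange 0 w_size 1).map
        (fun j => String.ofList ((PySem.List.pyGet? ((PySem.List.pyGet? (lines.map PySem.Chars.split₀) ((k : Int) + j)).getD []) 2).getD [])) =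
        (((lines.map PySem.Chars.split₀).drop ((k : Int)).toNat).take (w_size.toNat)).map
          (fun r => String.ofList ((PySem.List.pyGet? r 2).getD [])) :=
      pv_window_map (lines.map PySem.Chars.split₀) (fun r => String.ofList ((PySem.List.pyGet? r 2).getD [])) [] (k : Int) w_size (by omega) (by simp only [List.length_map]; omega)
    rw [hA1, hA2, hA3, PySem.List.slice_to _ hw]
    rw [show ((2 * w_size + 1).toNat) = s from by omega, Int.toNat_natCast]
    simp only [← List.map_drop, ← List.map_take, List.map_map, List.take_take]
    rw [show min w_size.toNat s = w_size.toNat from by omega]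
    rfl
  · simp only [PySem.List.foldl_append_singleton_eq_map, List.nil_append]
    rw [PySem.List.pyRange_one 0 ((lines.length : Int) - 2 * w_size), List.map_map]
    rw [show ((lines.length : Int) - 2 * w_size - 0).toNat = lines.length + 1 - s from by omega]
    apply List.map_congr_left
    intro k hk
    simp only [List.mem_range] at hk
    simp only [Function.comp, zero_add]
    have hidx : k + w_size.toNat < lines.length := by omega
    have e1 : PySem.List.pyGet? (lines.map PySem.Chars.split₀) ((k : Int) + w_size) =
        some (PySem.Chars.split₀ lines[k + w_size.toNat]) := by
      rw [show (k : Int) + w_size = ((k + w_size.toNat : Nat) : Int) from by omega,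
        PySem.List.pyGet?_natCast, List.getElem?_map, List.getElem?_eq_getElem hidx]
      rfl
    have e2 : PySem.List.pyGet? (((lines.map pvRowTup).drop k).take s) w_size =
        some (pvRowTup lines[k + w_size.toNat]) := by
      rw [PySem.List.pyGet?_of_nonneg _ hw, List.getElem?_take, if_pos (show w_size.toNat < s from by omega),
        List.getElem?_drop, List.getElem?_map, List.getElem?_eq_getElem hidx]
      rfl
    rw [e1, e2]
    rfl
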